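-- pv_equiv track=rewrite | github.com/AndyQYH/COEN291-Discord-Bot | jokes.py | joke_preprocess
-- ===== SOURCE A (Python) =====
-- def replace_special_characters(jokeList):
--     tmp_jokeList = []
--     for joke in jokeList:
--         tmp_jokeList.append(joke.replace('\r',' ').replace('\n', ' ').replace("'","").replace("|", ""))
--     return tmp_jokeList
--
-- def lowercase(jokeList):
--     tmp_jokeList = []
--     for joke in jokeList:
--         tmp_jokeList.append(joke.lower())
--     return tmp_jokeList
--
-- def remove_long_jokes(jokeList, max_len):
--     tmp_jokeList = []
--     for joke in jokeList:
--         if len(joke) <= max_len: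
--             tmp_jokeList.append(joke)
--     return tmp_jokeList
--
-- def replace(jokeList, bef, aft):
--     tmp_jokeList = []
--     for joke in jokeList:
--         tmp_jokeList.append(joke.replace(bef,aft))
--     return tmp_jokeList
--
-- def remove_empty(jokeList):
--     tmp_jokeList = []
--     for joke in jokeList:
--         if len(joke) > 0:
--             tmp_jokeList.append(joke)
--     return tmp_jokeList
--
-- def joke_preprocess(jokeList):
--     ### PREPROCESSING
--     tmp_jokeList = []
--     for j in jokeList:
--         joke = j
--         while "..." in joke:
--             joke = joke.replace("...","..")
--         tmp_jokeList.append(joke)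
--     jokeList = tmp_jokeList
--     jokeList = replace(jokeList, "."," DOT ")
--     jokeList = replace(jokeList, "?"," QUESTIONMARK ")
--     jokeList = replace_special_characters(jokeList)
--     jokeList = lowercase(jokeList)
--     jokeList = remove_long_jokes(jokeList, 200)
--     jokeList = remove_empty(jokeList)
--
--     return jokeList
-- ===== SOURCE B (Python) =====
-- def _collapse_dots(joke):
--     while "..." in joke:
--         joke = joke.replace("...", "..")
--     return joke
--
-- def joke_preprocess(jokeList):
--     out = []
--     for j in jokeList:
--         joke = (_collapse_dots(j)
--                 .replace(".", " DOT ")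
--                 .replace("?", " QUESTIONMARK ")
--                 .replace("\r", " ")
--                 .replace("\n", " ")
--                 .replace("'", "")
--                 .replace("|", "")
--                 .lower())
--         if 0 < len(joke) <= 200:
--             out.append(joke)
--     return out
-- ===== Notes on version B (the rewrite author's own statement) =====
-- stated objective: simpler
-- what changed: B replaces A's six sequential list passes (five helper functions each rebuilding a list) with a single loop that applies the whole transform chain to each joke and appends it only if it passes one combined 0 < len <= 200 filter.
import Mathlib
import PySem

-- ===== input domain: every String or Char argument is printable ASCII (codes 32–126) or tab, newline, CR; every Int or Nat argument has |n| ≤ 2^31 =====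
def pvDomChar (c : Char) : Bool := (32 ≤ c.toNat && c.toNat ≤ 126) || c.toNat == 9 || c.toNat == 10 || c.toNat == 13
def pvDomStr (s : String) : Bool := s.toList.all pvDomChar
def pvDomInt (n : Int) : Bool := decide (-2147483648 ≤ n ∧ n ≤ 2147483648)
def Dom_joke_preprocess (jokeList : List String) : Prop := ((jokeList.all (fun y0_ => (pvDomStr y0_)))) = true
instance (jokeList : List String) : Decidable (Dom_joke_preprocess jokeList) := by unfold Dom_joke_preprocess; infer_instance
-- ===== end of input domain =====

-- B is a single-pass rewrite of A's six list passes; equivalence of the RETURN value is proved (no argument mutation in either).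

-- shared helper: the `while "..." in joke: joke = joke.replace("...","..")` loop of both
-- Pythons, with a fuel guard that only makes the recursion total (each iteration of the
-- Python loop strictly shrinks the string, so fuel = length never runs out).
def pvCollapseGo : Nat → String → String
  | 0, s => s
  | n + 1, s =>
    if PySem.Str.isIn "..." s then pvCollapseGo n (PySem.Str.replace s "..." "..") else s

def pvCollapse (s : String) : String := pvCollapseGo s.toList.length s

-- ===== PORT A =====
def pvReplaceSpecialA (jokeList : List String) : List String :=
  jokeList.foldl (fun acc joke =>
    acc ++ [PySem.Str.replace (PySem.Str.replace (PySem.Str.replace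
      (PySem.Str.replace joke "\r" " ") "\n" " ") "'" "") "|" ""]) []

def pvLowercaseA (jokeList : List String) : List String :=
  jokeList.foldl (fun acc joke => acc ++ [PySem.Str.lower joke]) []

def pvRemoveLongA (jokeList : List String) (maxLen : Int) : List String :=
  jokeList.foldl (fun acc joke =>
    if PySem.Str.len joke ≤ maxLen then acc ++ [joke] else acc) []

def pvReplaceA (jokeList : List String) (bef aft : String) : List String :=
  jokeList.foldl (fun acc joke => acc ++ [PySem.Str.replace joke bef aft]) []

def pvRemoveEmptyA (jokeList : List String) : List String :=
  jokeList.foldl (fun acc joke =>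
    if 0 < PySem.Str.len joke then acc ++ [joke] else acc) []

def joke_preprocess (jokeList : List String) : List String :=
  let l1 := jokeList.foldl (fun acc j => acc ++ [pvCollapse j]) []
  let l2 := pvReplaceA l1 "." " DOT "
  let l3 := pvReplaceA l2 "?" " QUESTIONMARK "
  let l4 := pvReplaceSpecialA l3
  let l5 := pvLowercaseA l4
  let l6 := pvRemoveLongA l5 200
  pvRemoveEmptyA l6

-- ===== PORT B =====
def pvTransformB (j : String) : String :=
  PySem.Str.lower (PySem.Str.replace (PySem.Str.replace (PySem.Str.replace
    (PySem.Str.replace (PySem.Str.replace (PySem.Str.replace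
      (pvCollapse j) "." " DOT ") "?" " QUESTIONMARK ") "\r" " ") "\n" " ") "'" "") "|" "")

def joke_preprocess_alt (jokeList : List String) : List String :=
  jokeList.foldl (fun out j =>
    let joke := pvTransformB j
    if 0 < PySem.Str.len joke ∧ PySem.Str.len joke ≤ 200 then out ++ [joke] else out) []

-- ===== PRECONDITION & SPEC =====
def Spec_joke_preprocess (jokeList : List String) (out : List String) : Prop := out = joke_preprocess_alt jokeList
instance (jokeList : List String) (out : List String) : Decidable (Spec_joke_preprocess jokeList out) := by unfold Spec_joke_preprocess; infer_instance

-- ===== CLAIM (what is proved, stated in full; the proofs are below) =====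
def Claim_equal_joke_preprocess : Prop := ∀ (jokeList : List String), Dom_joke_preprocess jokeList → Spec_joke_preprocess jokeList (joke_preprocess jokeList)

-- ===== LEMMAS AND PROOFS =====
theorem pv_foldl_filter (p : String → Prop) [DecidablePred p] (l : List String)
    (acc : List String) :
    l.foldl (fun acc joke => if p joke then acc ++ [joke] else acc) acc
      = acc ++ l.filter (fun s => decide (p s)) := by
  induction l generalizing acc with
  | nil => simp only [List.foldl_nil, List.filter_nil, List.append_nil]
  | cons x xs ih =>
    rw [List.foldl_cons, ih, List.filter_cons]
    by_cases h : p x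
    · rw [if_pos h]
      simp only [decide_eq_true_eq, if_pos h, List.append_assoc, List.singleton_append]
    · rw [if_neg h]
      simp only [decide_eq_true_eq, if_neg h]

theorem pv_foldl_B (l : List String) (acc : List String) :
    l.foldl (fun out j =>
        let joke := pvTransformB j
        if 0 < PySem.Str.len joke ∧ PySem.Str.len joke ≤ 200 then out ++ [joke] else out) acc
      = acc ++ (l.map pvTransformB).filter
          (fun s => decide (0 < PySem.Str.len s ∧ PySem.Str.len s ≤ 200)) := by
  induction l generalizing acc with
  | nil => simp only [List.foldl_nil, List.map_nil, List.filter_nil, List.append_nil]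
  | cons x xs ih =>
    rw [List.foldl_cons, ih, List.map_cons, List.filter_cons]
    show (if 0 < PySem.Str.len (pvTransformB x) ∧ PySem.Str.len (pvTransformB x) ≤ 200
        then acc ++ [pvTransformB x] else acc) ++ _ = _
    by_cases h : 0 < PySem.Str.len (pvTransformB x) ∧ PySem.Str.len (pvTransformB x) ≤ 200
    · rw [if_pos h]
      simp only [decide_eq_true_eq, if_pos h, List.append_assoc, List.singleton_append]
    · rw [if_neg h]
      simp only [decide_eq_true_eq, if_neg h]

theorem pv_lemma (jokeList : List String) :
    joke_preprocess jokeList = joke_preprocess_alt jokeList := by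
  unfold joke_preprocess joke_preprocess_alt pvReplaceA pvReplaceSpecialA pvLowercaseA
    pvRemoveLongA pvRemoveEmptyA
  rw [pv_foldl_B]
  simp only [PySem.List.foldl_append_singleton_eq_map,
    pv_foldl_filter (fun s => PySem.Str.len s ≤ (200 : Int)),
    pv_foldl_filter (fun s => 0 < PySem.Str.len s), List.nil_append,
    List.filter_filter, List.map_map]
  refine List.filter_congr ?_ |>.trans (congrArg _ (List.map_congr_left ?_))
  · intro x _
    rw [Bool.decide_and]
  · intro x _
    rfl

-- ===== VERDICT (by name: the statement is the Claim_ definition above) =====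
theorem joke_preprocess_spec : Claim_equal_joke_preprocess := by
  intro jokeList _
  unfold Spec_joke_preprocess
  exact pv_lemma jokeList
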